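-- pv_equiv track=rewrite | github.com/HojoJohn/SoftDevi-Unit08 | activities.py | swapper
-- ===== SOURCE A (Python) =====
-- def swapper(a_list):
--     length = len(a_list)
--     if length <2:
--         return a_list
--     else:
--         half = length // 2
--         swapped = []
--
--     for index in range(half,length):
--         swapped.append(a_list[index])
--
--
--     for index in range(half):
--         swapped.append(a_list[index])
--     return swapped
-- ===== SOURCE B (Python) =====
-- def swapper(a_list):
--     if len(a_list) < 2:
--         return a_list
--     half = len(a_list) // 2
--     return a_list[half:] + a_list[:half]
-- ===== Notes on version B (the rewrite author's own statement) =====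
-- stated objective: idiomatic
-- what changed: Replaces A's two element-by-element append loops over range(half,length) and range(half) with a single slice concatenation a_list[half:] + a_list[:half], keeping the identity return for lists shorter than 2.
import Mathlib
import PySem

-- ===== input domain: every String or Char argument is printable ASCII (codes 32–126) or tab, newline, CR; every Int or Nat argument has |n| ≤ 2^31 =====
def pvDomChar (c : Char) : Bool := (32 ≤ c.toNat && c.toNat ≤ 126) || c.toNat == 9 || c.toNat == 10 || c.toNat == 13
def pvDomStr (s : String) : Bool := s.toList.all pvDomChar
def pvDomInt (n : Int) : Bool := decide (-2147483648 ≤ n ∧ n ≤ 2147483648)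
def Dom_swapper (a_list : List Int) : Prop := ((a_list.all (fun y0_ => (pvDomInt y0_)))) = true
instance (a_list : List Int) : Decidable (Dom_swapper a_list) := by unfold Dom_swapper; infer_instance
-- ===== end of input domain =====

-- B replaces A's two append loops with a single slice concatenation (idiomatic rotation).

-- ===== PORT A =====
-- literal transliteration: length/half, empty accumulator, two append loops
def swapper (a_list : List Int) : List Int :=
  let length : Int := a_list.length
  if length < 2 then a_list
  else
    let half := PySem.Int.floordiv length 2
    let swapped : List Int := []
    let swapped := (PySem.List.pyRange half length 1).foldl
      (fun acc index => acc ++ [PySem.List.pyGetD a_list index 0]) swapped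
    let swapped := (PySem.List.pyRange 0 half 1).foldl
      (fun acc index => acc ++ [PySem.List.pyGetD a_list index 0]) swapped
    swapped

-- ===== PORT B =====
def swapper_alt (a_list : List Int) : List Int :=
  if (a_list.length : Int) < 2 then a_list
  else
    let half := PySem.Int.floordiv (a_list.length : Int) 2
    PySem.List.slice a_list (some half) none ++ PySem.List.slice a_list none (some half)

-- ===== PRECONDITION & SPEC =====
def Spec_swapper (a_list : List Int) (out : List Int) : Prop := out = swapper_alt a_list
instance (a_list : List Int) (out : List Int) : Decidable (Spec_swapper a_list out) := by unfold Spec_swapper; infer_instance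

-- ===== CLAIM (what is proved, stated in full; the proofs are below) =====
def Claim_equal_swapper : Prop := ∀ (a_list : List Int), Dom_swapper a_list → Spec_swapper a_list (swapper a_list)

-- ===== LEMMAS AND PROOFS =====

-- prefix index loop: mapping pyGetD over range(0, n) with n ≤ length gives the take
theorem map_pyGetD_pyRange_take (xs : List Int) (n : Nat) (h : n ≤ xs.length) (d : Int) :
    (PySem.List.pyRange 0 (n : Int) 1).map (fun j => PySem.List.pyGetD xs j d) = xs.take n := by
  rw [PySem.List.pyRange_zero_nat, List.map_map]
  apply List.ext_getElem
  · simp [Nat.min_eq_left h]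
  · intro i h1 h2
    simp only [List.getElem_map, List.getElem_range, Function.comp_apply,
      PySem.List.pyGetD_natCast, List.getElem_take]
    simp at h1
    rw [List.getD_eq_getElem xs d (by omega)]

theorem swapper_spec : Claim_equal_swapper := by
  intro xs _
  unfold Spec_swapper swapper swapper_alt
  by_cases h : (xs.length : Int) < 2
  · simp [h]
  · simp only [h, if_false]
    have hfd : PySem.Int.floordiv (xs.length : Int) 2 = ((xs.length / 2 : Nat) : Int) := by
      exact_mod_cast PySem.Int.floordiv_natCast xs.length 2
    rw [hfd]
    rw [PySem.List.foldl_append_singleton_eq_map, PySem.List.foldl_append_singleton_eq_map]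
    rw [PySem.List.map_pyGetD_pyRange' xs 0 (a := ((xs.length / 2 : Nat) : Int)) (by positivity)]
    rw [map_pyGetD_pyRange_take xs (xs.length / 2) (Nat.div_le_self _ _) 0]
    rw [PySem.List.slice_from_natCast, PySem.List.slice_to_natCast]
    simp
    omega
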